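-- pv_equiv track=rewrite | github.com/HubertM6/MaturaBinaryNumbersPython | src/task_3.py | is_bigger
-- ===== SOURCE A (Python) =====
-- def is_bigger(a, b):
--     a_digits_count = len(a)
--     b_digits_count = len(b)
--     if a_digits_count > b_digits_count:
--         return True
--     elif b_digits_count > a_digits_count:
--         return False
--     else:
--         for i in range(0, a_digits_count):
--             if a[i] > b[i]:
--                 return True
--             elif b[i] > a[i]:
--                 return False
--     return False
-- ===== SOURCE B (Python) =====
-- def is_bigger(a, b):
--     if len(a) != len(b):
--         return len(a) > len(b)
--     # single right-to-left pass with an accumulator: the last (i.e. leftmost)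
--     # differing pair overwrites the verdict; no early return needed.
--     res = False
--     for x, y in zip(reversed(a), reversed(b)):
--         if x != y:
--             res = x > y
--     return res
-- ===== Notes on version B (the rewrite author's own statement) =====
-- stated objective: alternative
-- what changed: Replaces A's early-returning left-to-right index loop by a single right-to-left fold with a verdict accumulator that the last (leftmost) differing digit pair overwrites.
import Mathlib
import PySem

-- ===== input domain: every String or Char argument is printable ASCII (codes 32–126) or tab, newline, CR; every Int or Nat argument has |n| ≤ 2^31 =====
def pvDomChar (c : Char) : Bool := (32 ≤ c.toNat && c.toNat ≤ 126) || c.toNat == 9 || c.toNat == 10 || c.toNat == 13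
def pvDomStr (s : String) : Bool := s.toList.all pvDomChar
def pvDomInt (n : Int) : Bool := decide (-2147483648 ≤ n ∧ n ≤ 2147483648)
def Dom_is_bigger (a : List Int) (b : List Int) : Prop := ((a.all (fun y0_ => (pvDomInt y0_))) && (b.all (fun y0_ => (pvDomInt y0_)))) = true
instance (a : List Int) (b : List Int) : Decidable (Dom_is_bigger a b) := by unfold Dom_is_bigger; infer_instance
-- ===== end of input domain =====

-- B replaces A's early-returning left-to-right index loop by a single right-to-left fold
-- with a verdict accumulator (the last, i.e. leftmost, differing pair overwrites it); objective: alternative.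

-- ===== PORT A =====
-- the for-loop over i in range(0, len(a)), reached only when lengths are equal: walk both lists in step
def isBiggerLoop : List Int → List Int → Bool
  | x :: xs, y :: ys => if x > y then true else if y > x then false else isBiggerLoop xs ys
  | _, _ => false

def is_bigger (a : List Int) (b : List Int) : Bool :=
  let a_digits_count := a.length
  let b_digits_count := b.length
  if a_digits_count > b_digits_count then true
  else if b_digits_count > a_digits_count then false
  else isBiggerLoop a b

-- ===== PORT B =====
-- the 'for x, y in zip(reversed(a), reversed(b))' loop with accumulator res
def is_bigger_alt (a : List Int) (b : List Int) : Bool :=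
  if a.length ≠ b.length then decide (a.length > b.length)
  else (a.reverse.zip b.reverse).foldl
    (fun res p => if p.1 ≠ p.2 then decide (p.1 > p.2) else res) false

-- ===== PRECONDITION & SPEC =====
def Spec_is_bigger (a : List Int) (b : List Int) (out : Bool) : Prop := out = is_bigger_alt a b
instance (a : List Int) (b : List Int) (out : Bool) : Decidable (Spec_is_bigger a b out) := by unfold Spec_is_bigger; infer_instance

-- ===== CLAIM =====
def Claim_equal_is_bigger : Prop := ∀ (a : List Int) (b : List Int), Dom_is_bigger a b → Spec_is_bigger a b (is_bigger a b)

-- ===== LEMMAS AND PROOFS =====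
-- zipping the reverses of equal-length lists is the reverse of the zip
theorem zip_reverse_of_len : ∀ (a b : List Int), a.length = b.length →
    a.reverse.zip b.reverse = (a.zip b).reverse
  | [], [], _ => rfl
  | x :: xs, y :: ys, h => by
    have hl : xs.length = ys.length := by simpa using h
    have hr : xs.reverse.length = ys.reverse.length := by simpa using hl
    simp [List.zip_append hr, zip_reverse_of_len xs ys hl]
  | [], _ :: _, h => by simp at h
  | _ :: _, [], h => by simp at h

-- A's early-return loop equals the right fold of B's step function over the zip
theorem loop_eq_foldr : ∀ (a b : List Int),
    isBiggerLoop a b =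
      (a.zip b).foldr (fun p res => if p.1 ≠ p.2 then decide (p.1 > p.2) else res) false
  | [], _ => by cases ‹List Int› <;> rfl
  | _ :: _, [] => rfl
  | x :: xs, y :: ys => by
    simp only [isBiggerLoop, List.zip_cons_cons, List.foldr_cons, loop_eq_foldr xs ys]
    by_cases hxy : x = y
    · simp [hxy]
    · rcases lt_or_gt_of_ne hxy with hlt | hgt
      · simp [hxy, not_lt.mpr (le_of_lt hlt), hlt]
      · simp [hxy, hgt]

-- ===== VERDICT =====
theorem is_bigger_spec : Claim_equal_is_bigger := by
  intro a b _
  unfold Spec_is_bigger is_bigger is_bigger_alt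
  by_cases h : a.length = b.length
  · simp only [h, lt_irrefl, if_false, ne_eq, not_true, ite_false]
    rw [zip_reverse_of_len a b h, List.foldl_reverse, loop_eq_foldr a b]
  · rcases Nat.lt_or_gt_of_ne h with hlt | hgt
    · simp [hlt, Nat.not_lt.mpr (Nat.le_of_lt hlt), h]
    · simp [hgt, h]
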